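-- pv_equiv track=rewrite | github.com/prasanna-28/Puzzle-Solvers | hidato.py | solve_hidato
-- ===== SOURCE A (Python) =====
-- def is_valid_hidato(board, row, col, num):
--     for x in [-1, 0, 1]:
--         for y in [-1, 0, 1]:
--             if 0 <= row+x < len(board) and 0 <= col+y < len(board[0]):
--                 if board[row+x][col+y] == num:
--                     return False
--     return True
--
-- def solve_hidato(board, num):
--     for i in range(len(board)):
--         for j in range(len(board[i])):
--             if board[i][j] == 0:
--                 if is_valid_hidato(board, i, j, num+1):
--                     board[i][j] = num+1
--                     if num+1 == len(board)**2 or solve_hidato(board, num+1):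
--                         return True
--                     board[i][j] = 0
--                 return False
--     return True
-- ===== SOURCE B (Python) =====
-- def is_valid_hidato(board, row, col, num):
--     for x in [-1, 0, 1]:
--         for y in [-1, 0, 1]:
--             if 0 <= row+x < len(board) and 0 <= col+y < len(board[0]):
--                 if board[row+x][col+y] == num:
--                     return False
--     return True
--
-- def solve_hidato(board, num):
--     # iterative version: explicit loop over an increasing counter, with
--     # placement bookkeeping so failure undoes every cell set by this call
--     cur = num
--     placed = []
--     while True:
--         cell = next(((i, j) for i, row in enumerate(board)
--                      for j, v in enumerate(row) if v == 0), None)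
--         if cell is None:
--             return True
--         i, j = cell
--         if not is_valid_hidato(board, i, j, cur + 1):
--             for pi, pj in placed:
--                 board[pi][pj] = 0
--             return False
--         board[i][j] = cur + 1
--         placed.append((i, j))
--         if cur + 1 == len(board) ** 2:
--             return True
--         cur += 1
-- ===== Notes on version B (the rewrite author's own statement) =====
-- stated objective: alternative
-- what changed: The tail recursion over num is replaced by an explicit while-loop over an increasing counter cur, with a generator-based first-zero-cell search and a 'placed' list so that on failure all cells set by this call are undone in one pass instead of by unwinding recursive frames.
-- outside the precondition, e.g. on solve_hidato([[0, 1, 1], [1, 1, 1], [9, 9]], 0): A returns False, B returns False; on solve_hidato([[0, 0], [0]], 0): A raises IndexError, B raises IndexError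
import Mathlib
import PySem

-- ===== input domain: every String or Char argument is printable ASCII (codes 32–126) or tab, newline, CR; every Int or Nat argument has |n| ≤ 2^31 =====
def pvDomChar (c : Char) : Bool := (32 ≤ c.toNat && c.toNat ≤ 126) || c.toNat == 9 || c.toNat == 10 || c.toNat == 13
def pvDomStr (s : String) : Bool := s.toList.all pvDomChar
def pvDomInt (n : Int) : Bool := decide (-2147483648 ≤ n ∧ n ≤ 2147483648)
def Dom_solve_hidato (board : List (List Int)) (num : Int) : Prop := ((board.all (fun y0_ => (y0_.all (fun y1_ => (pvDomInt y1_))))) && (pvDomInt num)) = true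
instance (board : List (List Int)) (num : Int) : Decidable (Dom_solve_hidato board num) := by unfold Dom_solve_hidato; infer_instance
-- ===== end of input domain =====

-- B replaces A's tail recursion over `num` by an explicit counter loop with explicit
-- placement bookkeeping (objective: alternative decomposition, not speed).
-- Both Pythons mutate `board` in place identically; the theorems below are about the
-- return value only (the ports are pure and thread the updated board explicitly).

-- ===== PORT A =====

-- shared helper: Python is_valid_hidato (identical in Source A and Source B).
-- out-of-range reads (possible only outside Pre_) are totalized with getD.
def is_valid_hidato (board : List (List Int)) (row col num : Int) : Bool :=
  ([-1, 0, 1] : List Int).all fun x => ([-1, 0, 1] : List Int).all fun y =>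
    !(decide (0 ≤ row + x) && decide (row + x < (board.length : Int)) &&
      decide (0 ≤ col + y) && decide (col + y < ((board.headD []).length : Int)) &&
      ((PySem.List.pyGet? ((PySem.List.pyGet? board (row + x)).getD []) (col + y)).getD 0 == num))

-- shared helper: board[i][j] = v (indices produced by the scans are always in range)
def setCell (b : List (List Int)) (i j : Nat) (v : Int) : List (List Int) :=
  b.set i ((b.getD i []).set j v)

-- A's nested `for i`/`for j` scan for the first cell equal to 0, as in Source A
def rowZeroA : List Int → Nat → Option Nat
  | [], _ => none
  | v :: rest, j => if v == 0 then some j else rowZeroA rest (j + 1)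

def firstZeroA : List (List Int) → Nat → Option (Nat × Nat)
  | [], _ => none
  | row :: rest, i =>
    match rowZeroA row 0 with
    | some j => some (i, j)
    | none => firstZeroA rest (i + 1)

-- fuel = number of zero cells + 1: a pure totality guard (each recursive call of the
-- Python fills one zero cell with a nonzero value, so recursion depth < fuel)
def zerosA (board : List (List Int)) : Nat := (board.map (fun r => r.count 0)).sum

def solveA : Nat → List (List Int) → Int → Bool
  | 0, _, _ => true
  | fuel + 1, board, num =>
    match firstZeroA board 0 with
    | none => true
    | some (i, j) =>
      if is_valid_hidato board (i : Int) (j : Int) (num + 1) then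
        let board' := setCell board i j (num + 1)
        if num + 1 == (board.length : Int) ^ 2 then true
        else solveA fuel board' (num + 1)
      else false

def solve_hidato (board : List (List Int)) (num : Int) : Bool :=
  solveA (zerosA board + 1) board num

-- ===== PORT B =====

-- Source B's `next(((i, j) for i, row in enumerate(board) for j, v in enumerate(row) if v == 0), None)`
def findCellB (board : List (List Int)) : Option (Nat × Nat) :=
  (board.zipIdx.filterMap fun p =>
    (p.1.findIdx? (fun v => v == 0)).map fun j => (p.2, j)).head?

-- same fuel bound as a totality guard for the while-loop, counted Source B's way
def zerosB (board : List (List Int)) : Nat :=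
  board.foldl (fun a r => a + r.count 0) 0

def loopB : Nat → List (List Int) → List (Nat × Nat) → Int → Bool
  | 0, _, _, _ => true
  | fuel + 1, board, placed, cur =>
    match findCellB board with
    | none => true
    | some (i, j) =>
      if !(is_valid_hidato board (i : Int) (j : Int) (cur + 1)) then
        -- undo every placement made by this call (mutation; return value unaffected)
        let _undone := placed.foldl (fun b p => setCell b p.1 p.2 0) board
        false
      else
        let board' := setCell board i j (cur + 1)
        if cur + 1 == (board.length : Int) ^ 2 then true
        else loopB fuel board' (placed ++ [(i, j)]) (cur + 1)

def solve_hidato_alt (board : List (List Int)) (num : Int) : Bool :=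
  loopB (zerosB board + 1) board [] num

-- ===== PRECONDITION & SPEC =====
-- Pre_ excludes ragged boards (a row shorter than row 0) containing a zero cell: there
-- is_valid_hidato's `col+y < len(board[0])` guard can hit a too-short row and Python
-- raises IndexError (it excludes a few ragged boards on which A happens to return, see cites).
def Pre_solve_hidato (board : List (List Int)) (_num : Int) : Prop :=
  (∀ row ∈ board, (board.headD []).length ≤ row.length) ∨ (∀ row ∈ board, (0 : Int) ∉ row)
instance (board : List (List Int)) (num : Int) : Decidable (Pre_solve_hidato board num) := by
  unfold Pre_solve_hidato; infer_instance

def pvWitness_solve_hidato : List (List Int) × Int := ([[1, 0], [0, 0]], 1)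

def Spec_solve_hidato (board : List (List Int)) (num : Int) (out : Bool) : Prop := out = solve_hidato_alt board num
instance (board : List (List Int)) (num : Int) (out : Bool) : Decidable (Spec_solve_hidato board num out) := by unfold Spec_solve_hidato; infer_instance

-- ===== CLAIM (what is proved, stated in full; the proofs are below) =====
def Claim_equal_solve_hidato : Prop := ∀ (board : List (List Int)) (num : Int), Dom_solve_hidato board num → Pre_solve_hidato board num → Spec_solve_hidato board num (solve_hidato board num)

-- ===== LEMMAS AND PROOFS =====

-- B's per-row findIdx? agrees with A's hand-rolled row scan
theorem rowZeroA_eq (row : List Int) (j : Nat) :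
    rowZeroA row j = (row.findIdx? (fun v => v == 0)).map (fun k => k + j) := by
  induction row generalizing j with
  | nil => simp [rowZeroA]
  | cons a l ih =>
    by_cases h : a = 0
    · simp [rowZeroA, h, List.findIdx?_cons]
    · have h' : (a == 0) = false := by simp [h]
      cases hf : l.findIdx? (fun v => v == 0) with
      | none => simp [rowZeroA, h', List.findIdx?_cons, ih, hf]
      | some k =>
        simp [rowZeroA, h', List.findIdx?_cons, ih, hf]
        omega

-- the two first-zero-cell scans coincide
theorem scan_eq (board : List (List Int)) (i : Nat) :
    firstZeroA board i =
      ((board.zipIdx i).filterMap fun p =>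
        (p.1.findIdx? (fun v => v == 0)).map fun j => (p.2, j)).head? := by
  induction board generalizing i with
  | nil => simp [firstZeroA]
  | cons row rest ih =>
    cases hf : row.findIdx? (fun v => v == 0) with
    | none =>
      have hr : rowZeroA row 0 = none := by simp [rowZeroA_eq, hf]
      simp [firstZeroA, hr, List.zipIdx_cons, hf, ih]
    | some j =>
      have hr : rowZeroA row 0 = some j := by simp [rowZeroA_eq, hf]
      simp [firstZeroA, hr, List.zipIdx_cons, hf]

-- the two zero counts coincide
theorem zeros_eq (board : List (List Int)) : zerosB board = zerosA board := by
  have h : ∀ (bd : List (List Int)) (a : Nat),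
      bd.foldl (fun a r => a + r.count 0) a = a + (bd.map (fun r => r.count 0)).sum := by
    intro bd
    induction bd with
    | nil => simp
    | cons r rest ih => intro a; simp [List.foldl_cons, ih, Nat.add_assoc]
  simpa [zerosB, zerosA] using h board 0

-- B's loop computes exactly A's recursion, for any placement log
theorem loop_eq (fuel : Nat) :
    ∀ (board : List (List Int)) (placed : List (Nat × Nat)) (cur : Int),
      loopB fuel board placed cur = solveA fuel board cur := by
  induction fuel with
  | zero => intro _ _ _; rfl
  | succ fuel ih =>
    intro board placed cur
    show loopB (fuel + 1) board placed cur = solveA (fuel + 1) board cur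
    rw [loopB, solveA, findCellB, ← scan_eq board 0]
    cases firstZeroA board 0 with
    | none => rfl
    | some ij =>
      obtain ⟨i, j⟩ := ij
      cases hv : is_valid_hidato board (i : Int) (j : Int) (cur + 1) with
      | false => simp [hv]
      | true => simp [hv, ih]

-- ===== VERDICT (by name: the statement is the Claim_ definition above) =====
theorem solve_hidato_spec : Claim_equal_solve_hidato := by
  intro board num _ _
  unfold Spec_solve_hidato solve_hidato solve_hidato_alt
  rw [zeros_eq, loop_eq]
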